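-- pv_equiv track=rewrite | github.com/miliar/Code_Jam_Webscraper | solutions_python/Problem_201/825.py | min_max_free
-- ===== SOURCE A (Python) =====
-- def min_max_free(n, k):
--     assert 1 <= k <= n
--     n -= 1
--     if k == 1:
--         return n // 2 + n % 2, n // 2
--     k -= 1
--     if k % 2 == 0:
--         return min_max_free(n // 2, k // 2)
--     else:
--         return min_max_free(n // 2 + n % 2, k // 2 + k % 2)
-- ===== SOURCE B (Python) =====
-- def min_max_free(n, k):
--     assert 1 <= k <= n
--     # closed form: the k-th person lands in a segment of size s at level
--     # t = bit_length(k)-1; segments there have size x+1 (r of them) or x.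
--     p = 1 << (k.bit_length() - 1)
--     x, r = divmod(n - p + 1, p)
--     s = x + 1 if k - p < r else x
--     return ((s - 1) // 2 + (s - 1) % 2, (s - 1) // 2)
-- ===== Notes on version B (the rewrite author's own statement) =====
-- stated objective: alternative
-- what changed: Replaces the recursion that re-halves n and k once per level by a direct closed-form computation: the level is read off as bit_length(k)-1 and the segment size is obtained by one divmod, no recursion or loop.
import Mathlib
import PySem

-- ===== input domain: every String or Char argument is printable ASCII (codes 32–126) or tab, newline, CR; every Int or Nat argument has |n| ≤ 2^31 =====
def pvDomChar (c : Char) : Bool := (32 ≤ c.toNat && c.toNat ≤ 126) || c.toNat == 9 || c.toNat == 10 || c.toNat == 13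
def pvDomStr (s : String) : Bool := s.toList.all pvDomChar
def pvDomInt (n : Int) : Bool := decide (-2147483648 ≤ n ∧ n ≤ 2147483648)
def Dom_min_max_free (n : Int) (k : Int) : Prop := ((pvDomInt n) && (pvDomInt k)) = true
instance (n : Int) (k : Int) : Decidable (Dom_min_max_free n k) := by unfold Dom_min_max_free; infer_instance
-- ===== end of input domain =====

-- B replaces A's per-level recursion by a closed-form segment computation (alternative algorithm, same result).


-- ===== PORT A =====
-- literal port of Source A; the `else (0, 0)` arm is where the Python assert raises (excluded by Pre_).
def min_max_free (n : Int) (k : Int) : Int × Int :=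
  if _h : 1 ≤ k ∧ k ≤ n then
    let n' := n - 1
    if k = 1 then
      (PySem.Int.floordiv n' 2 + PySem.Int.mod n' 2, PySem.Int.floordiv n' 2)
    else
      let k' := k - 1
      if PySem.Int.mod k' 2 = 0 then
        min_max_free (PySem.Int.floordiv n' 2) (PySem.Int.floordiv k' 2)
      else
        min_max_free (PySem.Int.floordiv n' 2 + PySem.Int.mod n' 2)
                     (PySem.Int.floordiv k' 2 + PySem.Int.mod k' 2)
  else (0, 0)
termination_by k.toNat
decreasing_by
  all_goals
    simp only [PySem.Int.floordiv_eq_ediv_of_pos (show (0:Int) < 2 by omega),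
               PySem.Int.mod_eq_emod_of_pos (show (0:Int) < 2 by omega)]
    omega

-- ===== PORT B =====
-- literal port of Source B; the `else (0, 0)` arm is where the Python assert raises (excluded by Pre_).
def min_max_free_alt (n : Int) (k : Int) : Int × Int :=
  if 1 ≤ k ∧ k ≤ n then
    let p : Int := 2 ^ (PySem.Int.bitLength k - 1)
    let x := PySem.Int.floordiv (n - p + 1) p
    let r := PySem.Int.mod (n - p + 1) p
    let s := if k - p < r then x + 1 else x
    (PySem.Int.floordiv (s - 1) 2 + PySem.Int.mod (s - 1) 2, PySem.Int.floordiv (s - 1) 2)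
  else (0, 0)

-- ===== PRECONDITION & SPEC =====
-- Pre_ excludes exactly the inputs on which A's `assert 1 <= k <= n` raises AssertionError.
def Pre_min_max_free (n : Int) (k : Int) : Prop := 1 ≤ k ∧ k ≤ n
instance (n : Int) (k : Int) : Decidable (Pre_min_max_free n k) := by unfold Pre_min_max_free; infer_instance
def pvWitness_min_max_free : Int × Int := (10, 4)

def Spec_min_max_free (n : Int) (k : Int) (out : Int × Int) : Prop := out = min_max_free_alt n k
instance (n : Int) (k : Int) (out : Int × Int) : Decidable (Spec_min_max_free n k out) := by unfold Spec_min_max_free; infer_instance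

-- ===== CLAIM (what is proved, stated in full; the proofs are below) =====
def Claim_equal_min_max_free : Prop := ∀ (n : Int) (k : Int), Dom_min_max_free n k → Pre_min_max_free n k → Spec_min_max_free n k (min_max_free n k)

-- ===== LEMMAS AND PROOFS =====

lemma pv_bitLength_pos (k : Int) (hk : 1 ≤ k) : 1 ≤ PySem.Int.bitLength k := by
  by_contra h
  have h0 : PySem.Int.bitLength k = 0 := by omega
  have := PySem.Int.lt_two_pow_bitLength k
  rw [h0] at this
  simp at this
  omega

lemma pv_bitLength_bounds (k : Int) (hk : 1 ≤ k) :
    (2:Int) ^ (PySem.Int.bitLength k - 1) ≤ k ∧ k < 2 ^ (PySem.Int.bitLength k) := by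
  have h1 := PySem.Int.two_pow_bitLength_le k (by omega)
  have h2 := PySem.Int.lt_two_pow_bitLength k
  have hna : (k.natAbs : Int) = k := Int.natAbs_of_nonneg (by omega)
  constructor
  · calc (2:Int) ^ (PySem.Int.bitLength k - 1) = ((2 ^ (PySem.Int.bitLength k - 1) : Nat) : Int) := by push_cast; ring
      _ ≤ (k.natAbs : Int) := by exact_mod_cast h1
      _ = k := hna
  · calc k = (k.natAbs : Int) := hna.symm
      _ < ((2 ^ (PySem.Int.bitLength k) : Nat) : Int) := by exact_mod_cast h2
      _ = 2 ^ (PySem.Int.bitLength k) := by push_cast; ring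

lemma pv_bitLength_half (k : Int) (hk : 2 ≤ k) :
    PySem.Int.bitLength k = PySem.Int.bitLength (k / 2) + 1 := by
  have := PySem.Int.bitLength_of_pos (n := k) (by omega)
  rwa [PySem.Int.floordiv_eq_ediv_of_pos (by omega : (0:Int) < 2)] at this

lemma pv_div_cases (P a b : Int) (hP : 0 < P) (h1 : -P < P * a - P * b) (h2 : P * a - P * b ≤ P) :
    a = b ∨ a = b + 1 := by
  have e : P * (a - b) = P * a - P * b := by ring
  have l2 : a - b ≤ 1 := le_of_mul_le_mul_left (by rw [e]; linarith) hP
  have l1 : (-1:Int) < a - b := lt_of_mul_lt_mul_left (by rw [e]; linarith) (le_of_lt hP)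
  omega

lemma pv_alt_step (n k : Int) (hk : 2 ≤ k) (hkn : k ≤ n) :
    min_max_free_alt n k =
      if (k - 1) % 2 = 0
      then min_max_free_alt ((n-1)/2) ((k-1)/2)
      else min_max_free_alt ((n-1)/2 + (n-1)%2) ((k-1)/2 + (k-1)%2) := by
  have hk2 : (1:Int) ≤ k / 2 := by omega
  have hbl2 : 1 ≤ PySem.Int.bitLength (k / 2) := pv_bitLength_pos _ hk2
  obtain ⟨hlo2, hhi2⟩ := pv_bitLength_bounds (k / 2) hk2
  have hbk : PySem.Int.bitLength k = PySem.Int.bitLength (k / 2) + 1 := pv_bitLength_half k hk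
  set t1 : Nat := PySem.Int.bitLength (k / 2) - 1 with ht1
  have hbk2 : PySem.Int.bitLength (k / 2) = t1 + 1 := by omega
  set P : Int := 2 ^ t1 with hPdef
  have hP : 0 < P := by positivity
  have hp2 : (2:Int) ^ (t1 + 1) = 2 * P := by rw [pow_succ]; ring
  have hhi2' : k / 2 < 2 * P := by rw [hbk2, hp2] at hhi2; exact hhi2
  have hn2 : 2*((n-1)/2) + (n-1)%2 = n - 1 := by omega
  have hc01 : 0 ≤ (n-1)%2 ∧ (n-1)%2 < 2 := by omega
  by_cases hpar : (k - 1) % 2 = 0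
  · -- k odd
    rw [if_pos hpar]
    have hkhalf : (k - 1) / 2 = k / 2 := by omega
    rw [hkhalf]
    have hguard1 : (1:Int) ≤ k ∧ k ≤ n := ⟨by omega, hkn⟩
    have hguard2 : (1:Int) ≤ k / 2 ∧ k / 2 ≤ (n-1)/2 := ⟨hk2, by omega⟩
    simp only [min_max_free_alt, if_pos hguard1, if_pos hguard2, hbk, hbk2, Nat.add_sub_cancel, hp2, ← hPdef]
    rw [PySem.Int.floordiv_eq_ediv_of_pos (show (0:Int) < 2*P by positivity),
        PySem.Int.mod_eq_emod_of_pos (show (0:Int) < 2*P by positivity),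
        PySem.Int.floordiv_eq_ediv_of_pos (show (0:Int) < P by positivity),
        PySem.Int.mod_eq_emod_of_pos (show (0:Int) < P by positivity)]
    set q : Int := n - 2*P + 1 with hqdef
    set q1 : Int := (n-1)/2 - P + 1 with hq1def
    set x : Int := q / (2*P) with hxdef
    set r : Int := q % (2*P) with hrdef
    set x1 : Int := q1 / P with hx1def
    set r1 : Int := q1 % P with hr1def
    have hq : 2*P*x + r = q := by rw [hxdef, hrdef]; exact Int.mul_ediv_add_emod q (2*P)
    have hq1 : P*x1 + r1 = q1 := by rw [hx1def, hr1def]; exact Int.mul_ediv_add_emod q1 P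
    have hr0 : 0 ≤ r := by rw [hrdef]; exact Int.emod_nonneg q (by positivity)
    have hrlt : r < 2*P := by rw [hrdef]; exact Int.emod_lt_of_pos q (by positivity)
    have hr10 : 0 ≤ r1 := by rw [hr1def]; exact Int.emod_nonneg q1 (by positivity)
    have hr1lt : r1 < P := by rw [hr1def]; exact Int.emod_lt_of_pos q1 hP
    have hqv : q = n - 2*P + 1 := hqdef
    have hq1v : q1 = (n-1)/2 - P + 1 := hq1def
    have hd := pv_div_cases P x1 x hP (by linarith [hq, hq1, hqv, hq1v, hn2])
      (by linarith [hq, hq1, hqv, hq1v, hn2])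
    rcases hd with h | h
    · have hPx : P*x1 = P*x := by rw [h]
      have hrr : 2*r1 + (n-1)%2 = r := by linarith [hq, hq1, hqv, hq1v, hn2, hPx]
      have hiff : (k - 2*P < r) ↔ (k/2 - P < r1) := by omega
      simp only [hiff, h]
    · exfalso
      have hPx : P*x1 = P*x + P := by rw [h]; ring
      linarith [hq, hq1, hqv, hq1v, hn2, hPx]
  · -- k even
    rw [if_neg hpar]
    have hkhalf : (k - 1) / 2 + (k - 1) % 2 = k / 2 := by omega
    rw [hkhalf]
    have hguard1 : (1:Int) ≤ k ∧ k ≤ n := ⟨by omega, hkn⟩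
    have hguard2 : (1:Int) ≤ k / 2 ∧ k / 2 ≤ (n-1)/2 + (n-1)%2 := ⟨hk2, by omega⟩
    simp only [min_max_free_alt, if_pos hguard1, if_pos hguard2, hbk, hbk2, Nat.add_sub_cancel, hp2, ← hPdef]
    rw [PySem.Int.floordiv_eq_ediv_of_pos (show (0:Int) < 2*P by positivity),
        PySem.Int.mod_eq_emod_of_pos (show (0:Int) < 2*P by positivity),
        PySem.Int.floordiv_eq_ediv_of_pos (show (0:Int) < P by positivity),
        PySem.Int.mod_eq_emod_of_pos (show (0:Int) < P by positivity)]
    set q : Int := n - 2*P + 1 with hqdef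
    set q1 : Int := (n-1)/2 + (n-1)%2 - P + 1 with hq1def
    set x : Int := q / (2*P) with hxdef
    set r : Int := q % (2*P) with hrdef
    set x1 : Int := q1 / P with hx1def
    set r1 : Int := q1 % P with hr1def
    have hq : 2*P*x + r = q := by rw [hxdef, hrdef]; exact Int.mul_ediv_add_emod q (2*P)
    have hq1 : P*x1 + r1 = q1 := by rw [hx1def, hr1def]; exact Int.mul_ediv_add_emod q1 P
    have hr0 : 0 ≤ r := by rw [hrdef]; exact Int.emod_nonneg q (by positivity)
    have hrlt : r < 2*P := by rw [hrdef]; exact Int.emod_lt_of_pos q (by positivity)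
    have hr10 : 0 ≤ r1 := by rw [hr1def]; exact Int.emod_nonneg q1 (by positivity)
    have hr1lt : r1 < P := by rw [hr1def]; exact Int.emod_lt_of_pos q1 hP
    have hqv : q = n - 2*P + 1 := hqdef
    have hq1v : q1 = (n-1)/2 + (n-1)%2 - P + 1 := hq1def
    have hd := pv_div_cases P x1 x hP (by linarith [hq, hq1, hqv, hq1v, hn2])
      (by linarith [hq, hq1, hqv, hq1v, hn2])
    rcases hd with h | h
    · have hPx : P*x1 = P*x := by rw [h]
      have hrr : 2*r1 = r + (n-1)%2 := by linarith [hq, hq1, hqv, hq1v, hn2, hPx]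
      have hiff : (k - 2*P < r) ↔ (k/2 - P < r1) := by omega
      simp only [hiff, h]
    · have hPx : P*x1 = P*x + P := by rw [h]; ring
      have hlin : 2*r1 + 2*P = r + (n-1)%2 := by linarith [hq, hq1, hqv, hq1v, hn2, hPx]
      have hfacts : r1 = 0 ∧ r = 2*P - 1 ∧ (n-1)%2 = 1 := by omega
      have hcl : k - 2*P < r := by omega
      have hcr : ¬ (k/2 - P < r1) := by omega
      simp only [if_pos hcl, if_neg hcr, h]

lemma pv_alt_base (n : Int) (hn : 1 ≤ n) :
    min_max_free_alt n 1 =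
      (PySem.Int.floordiv (n - 1) 2 + PySem.Int.mod (n - 1) 2, PySem.Int.floordiv (n - 1) 2) := by
  have hb : PySem.Int.bitLength (1:Int) = 1 := by decide
  simp only [min_max_free_alt, hb]
  rw [if_pos ⟨le_refl 1, hn⟩]
  norm_num [PySem.Int.floordiv_eq_ediv_of_pos (show (0:Int) < 1 by omega),
            PySem.Int.mod_eq_emod_of_pos (show (0:Int) < 1 by omega)]

lemma pv_main : ∀ (K : Nat) (n k : Int), k.toNat ≤ K → 1 ≤ k → k ≤ n →
    min_max_free n k = min_max_free_alt n k := by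
  intro K
  induction K with
  | zero => intro n k hK h1 _; omega
  | succ K ih =>
    intro n k hK h1 hkn
    by_cases hk1 : k = 1
    · subst hk1
      rw [min_max_free, dif_pos ⟨h1, hkn⟩, if_pos rfl, pv_alt_base n hkn]
    · have hk2 : 2 ≤ k := by omega
      rw [min_max_free, dif_pos ⟨h1, hkn⟩, if_neg hk1, pv_alt_step n k hk2 hkn]
      simp only [PySem.Int.floordiv_eq_ediv_of_pos (show (0:Int) < 2 by omega),
                 PySem.Int.mod_eq_emod_of_pos (show (0:Int) < 2 by omega)]
      by_cases hpar : (k - 1) % 2 = 0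
      · rw [if_pos hpar, if_pos hpar]
        exact ih _ _ (by omega) (by omega) (by omega)
      · rw [if_neg hpar, if_neg hpar]
        exact ih _ _ (by omega) (by omega) (by omega)

-- ===== VERDICT (by name: the statement is the Claim_ definition above) =====
theorem min_max_free_spec : Claim_equal_min_max_free := by
  intro n k _ hpre
  unfold Spec_min_max_free
  exact pv_main k.toNat n k le_rfl hpre.1 hpre.2
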